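-- pv_equiv track=rewrite | github.com/julnas/ImageRecommender | searchAlg/build_indexes.py | _choose_m
-- ===== SOURCE A (Python) =====
-- def _choose_m(d: int, target_code_bytes: int) -> int:
--     """
--     Wähle m (PQ-Segmente) so, dass:
--       - m * 1 byte ≈ target_code_bytes (da 8 bits pro Subquantizer)
--       - d % m == 0
--     Fallback: größter Teiler aus [64, 32, 16, 8, 4, 2] der d teilt und <= gewünschtem m.
--     """
--     desired_m = max(1, min(d, target_code_bytes))  # 8 bits → 1 Byte pro Subquantizer
--     # runde desired_m auf "vernünftige" Kandidaten herunter (Powers of two sind praktisch)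
--     candidates = sorted({desired_m, 64, 32, 16, 8, 4, 2, 1}, reverse=True)
--     # füge evtl. noch Divisoren von d um desired_m herum hinzu
--     for m in range(min(desired_m, d), 0, -1):
--         if d % m == 0:
--             candidates.append(m)
--             if len(candidates) > 50:
--                 break
--     # dedupliziere & sortiere
--     candidates = sorted(set(candidates), reverse=True)
--     for m in candidates:
--         if m <= d and d % m == 0:
--             return m
--     return 1  # Fallback, sollte nie erreicht werden
-- ===== SOURCE B (Python) =====
-- def _choose_m(d: int, target_code_bytes: int) -> int:
--     # Enumerate divisors of d in O(sqrt d) instead of A's O(min(d, target)) descending scan.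
--     if d <= 0:
--         return 1
--     desired = max(1, min(d, target_code_bytes))
--     best = 1
--     i = 1
--     while i * i <= d:
--         if d % i == 0:
--             for x in (i, d // i):
--                 if x <= desired or x in (64, 32, 16, 8, 4, 2):
--                     if x > best:
--                         best = x
--         i += 1
--     return best
-- ===== Notes on version B (the rewrite author's own statement) =====
-- stated objective: faster
-- what changed: A scans m downward from min(desired, d) to 1 looking for divisors and then re-sorts a candidate list; B enumerates all divisors of d in one pass up to sqrt(d) (pairs i and d//i) and keeps the best admissible one with a running maximum.
import Mathlib
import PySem

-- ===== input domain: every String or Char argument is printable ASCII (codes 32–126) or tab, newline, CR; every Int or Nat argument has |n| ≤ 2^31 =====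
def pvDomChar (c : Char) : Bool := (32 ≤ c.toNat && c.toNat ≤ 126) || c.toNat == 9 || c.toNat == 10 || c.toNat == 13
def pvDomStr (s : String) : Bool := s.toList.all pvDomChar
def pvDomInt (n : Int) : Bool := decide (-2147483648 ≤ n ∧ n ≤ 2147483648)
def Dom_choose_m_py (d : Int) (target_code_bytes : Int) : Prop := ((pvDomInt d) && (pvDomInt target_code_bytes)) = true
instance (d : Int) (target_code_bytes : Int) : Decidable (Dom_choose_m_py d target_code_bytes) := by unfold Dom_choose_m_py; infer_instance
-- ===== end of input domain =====

-- B replaces A's descending O(min(d,target)) scan for a divisor by a single O(sqrt d) divisor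
-- enumeration (pairs i, d//i), tracking the best admissible divisor; return value only, no side effects.

-- ===== PORT A =====
-- the 'for m in range(min(desired_m, d), 0, -1)' loop, fuel = current m
def chooseLoopA (d : Int) : Nat → List Int → List Int
  | 0, cs => cs
  | m + 1, cs =>
    if PySem.Int.mod d ((m : Int) + 1) = 0 then
      let cs' := cs ++ [(m : Int) + 1]
      if cs'.length > 50 then cs' else chooseLoopA d m cs'
    else chooseLoopA d m cs

-- the final 'for m in candidates: if m <= d and d % m == 0: return m' with fallback 1
def pickA (d : Int) : List Int → Int
  | [] => 1
  | m :: rest => if m ≤ d ∧ PySem.Int.mod d m = 0 then m else pickA d rest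

def choose_m_py (d : Int) (target_code_bytes : Int) : Int :=
  let desired_m := max 1 (min d target_code_bytes)
  let candidates0 := PySem.List.sorted (PySem.Set.ofList [desired_m, 64, 32, 16, 8, 4, 2, 1]) (fun x => x) true
  let candidates1 := chooseLoopA d (min desired_m d).toNat candidates0
  let candidates2 := PySem.List.sorted (PySem.Set.ofList candidates1) (fun x => x) true
  pickA d candidates2

-- ===== PORT B =====
-- the 'for x in (i, d // i): if <admissible>: if x > best: best = x' body of Source B
def updB (desired best x : Int) : Int :=
  if x ≤ desired ∨ x = 64 ∨ x = 32 ∨ x = 16 ∨ x = 8 ∨ x = 4 ∨ x = 2 then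
    (if x > best then x else best)
  else best

-- the 'while i * i <= d' loop of Source B; i is the Python loop variable (always ≥ 1)
def loopB (d desired : Int) (i : Nat) (best : Int) : Int :=
  if h : (i : Int) * (i : Int) ≤ d then
    let best1 :=
      if PySem.Int.mod d (i : Int) = 0 then
        updB desired (updB desired best (i : Int)) (PySem.Int.floordiv d (i : Int))
      else best
    loopB d desired (i + 1) best1
  else best
termination_by (d + 1 - (i : Int) * (i : Int)).toNat
decreasing_by
  have hi : (0 : Int) ≤ (i : Int) := Int.natCast_nonneg i
  have h2 : (i : Int) * (i : Int) < ((i : Int) + 1) * ((i : Int) + 1) := by nlinarith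
  push_cast
  have h3 : (0 : Int) < d + 1 - (i : Int) * (i : Int) := by omega
  generalize hp : (i : Int) * (i : Int) = p at *
  generalize hq : ((i : Int) + 1) * ((i : Int) + 1) = q at *
  omega

def choose_m_py_alt (d : Int) (target_code_bytes : Int) : Int :=
  if d ≤ 0 then 1
  else loopB d (max 1 (min d target_code_bytes)) 1 1

-- ===== PRECONDITION & SPEC =====
def Spec_choose_m_py (d : Int) (target_code_bytes : Int) (out : Int) : Prop := out = choose_m_py_alt d target_code_bytes
instance (d : Int) (target_code_bytes : Int) (out : Int) : Decidable (Spec_choose_m_py d target_code_bytes out) := by unfold Spec_choose_m_py; infer_instance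

-- ===== CLAIM (what is proved, stated in full; the proofs are below) =====
def Claim_equal_choose_m_py : Prop := ∀ (d : Int) (target_code_bytes : Int), Dom_choose_m_py d target_code_bytes → Spec_choose_m_py d target_code_bytes (choose_m_py d target_code_bytes)

-- ===== LEMMAS AND PROOFS =====

-- x "qualifies": it is what both programs maximise over (positive divisor of d that is
-- ≤ desired or one of the fixed power-of-two candidates)
def Qual (d desired x : Int) : Prop :=
  1 ≤ x ∧ x ∣ d ∧ (x ≤ desired ∨ x = 64 ∨ x = 32 ∨ x = 16 ∨ x = 8 ∨ x = 4 ∨ x = 2)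

-- ---- A-side lemmas ----

theorem loopA_mono (d : Int) (x : Int) :
    ∀ (fuel : Nat) (cs : List Int), x ∈ cs → x ∈ chooseLoopA d fuel cs := by
  intro fuel
  induction fuel with
  | zero => intro cs h; simpa [chooseLoopA] using h
  | succ m ih =>
    intro cs h
    simp only [chooseLoopA]
    split
    · split
      · exact List.mem_append_left _ h
      · exact ih _ (List.mem_append_left _ h)
    · exact ih _ h

theorem loopA_mem (d : Int) (x : Int) :
    ∀ (fuel : Nat) (cs : List Int), x ∈ chooseLoopA d fuel cs →
      x ∈ cs ∨ (1 ≤ x ∧ x ≤ (fuel : Int) ∧ x ∣ d) := by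
  intro fuel
  induction fuel with
  | zero => intro cs h; exact Or.inl (by simpa [chooseLoopA] using h)
  | succ m ih =>
    intro cs h
    simp only [chooseLoopA] at h
    split at h
    · rename_i hmod
      have hdvd : ((m : Int) + 1) ∣ d := (PySem.Int.mod_eq_zero_iff_dvd d _).mp hmod
      split at h
      · rcases List.mem_append.mp h with h' | h'
        · exact Or.inl h'
        · right
          have : x = (m : Int) + 1 := by simpa using h'
          subst this
          refine ⟨by omega, by push_cast; omega, hdvd⟩
      · rcases ih _ h with h' | h'
        · rcases List.mem_append.mp h' with h'' | h''
          · exact Or.inl h''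
          · right
            have : x = (m : Int) + 1 := by simpa using h''
            subst this
            refine ⟨by omega, by push_cast; omega, hdvd⟩
        · right; refine ⟨h'.1, by push_cast; push_cast at h'; omega, h'.2.2⟩
    · rcases ih _ h with h' | h'
      · exact Or.inl h'
      · right; refine ⟨h'.1, by push_cast; push_cast at h'; omega, h'.2.2⟩

-- every divisor x of d with 1 ≤ x ≤ fuel is dominated by some divisor that the loop keeps
theorem loopA_cover (d : Int) :
    ∀ (fuel : Nat) (cs : List Int) (x : Int), 1 ≤ x → x ≤ (fuel : Int) → x ∣ d →
      ∃ y ∈ chooseLoopA d fuel cs, x ≤ y ∧ y ∣ d ∧ 1 ≤ y ∧ y ≤ (fuel : Int) := by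
  intro fuel
  induction fuel with
  | zero => intro cs x h1 h2 _; exfalso; omega
  | succ m ih =>
    intro cs x h1 h2 hdvd
    by_cases hmod : PySem.Int.mod d ((m : Int) + 1) = 0
    · -- m+1 divides d: it is appended and dominates x
      have hdv : ((m : Int) + 1) ∣ d := (PySem.Int.mod_eq_zero_iff_dvd d _).mp hmod
      refine ⟨(m : Int) + 1, ?_, by push_cast at h2; omega, hdv, by omega, by push_cast; omega⟩
      simp only [chooseLoopA, hmod, if_pos]
      split
      · simp
      · exact loopA_mono d _ _ _ (by simp)
    · -- m+1 does not divide d, so x ≤ m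
      have hx : x ≠ (m : Int) + 1 := by
        intro h; apply hmod; rw [← h]; exact (PySem.Int.mod_eq_zero_iff_dvd d x).mpr hdvd
      have h2' : x ≤ (m : Int) := by push_cast at h2 ⊢; omega
      obtain ⟨y, hy, hxy, hydvd, hy1, hym⟩ := ih cs x h1 h2' hdvd
      refine ⟨y, ?_, hxy, hydvd, hy1, by push_cast at hym ⊢; omega⟩
      simpa only [chooseLoopA, hmod, if_neg, if_false] using hy

-- ---- pickA on a strictly descending list ----

theorem pickA_ub (d : Int) :
    ∀ (l : List Int), l.Pairwise (fun a b => b < a) →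
      ∀ y ∈ l, (y ≤ d ∧ PySem.Int.mod d y = 0) → y ≤ pickA d l := by
  intro l
  induction l with
  | nil => intro _ y hy; exact absurd hy (List.not_mem_nil)
  | cons h t ih =>
    intro hp y hy hP
    rcases List.pairwise_cons.mp hp with ⟨hht, ht⟩
    simp only [pickA]
    split
    · rcases List.mem_cons.mp hy with rfl | hyt
      · exact le_refl y
      · exact le_of_lt (hht y hyt)
    · rename_i hnP
      rcases List.mem_cons.mp hy with rfl | hyt
      · exact absurd hP hnP
      · exact ih ht y hyt hP

theorem pickA_mem (d : Int) (hd : (1 : Int) ≤ d) :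
    ∀ (l : List Int), (1 : Int) ∈ l →
      pickA d l ∈ l ∧ pickA d l ≤ d ∧ pickA d l ∣ d := by
  intro l
  induction l with
  | nil => intro h; exact absurd h (List.not_mem_nil)
  | cons h t ih =>
    intro h1
    simp only [pickA]
    split
    · rename_i hP
      exact ⟨List.mem_cons_self, hP.1, (PySem.Int.mod_eq_zero_iff_dvd d h).mp hP.2⟩
    · rename_i hnP
      have h1t : (1 : Int) ∈ t := by
        rcases List.mem_cons.mp h1 with rfl | h'
        · exact absurd ⟨hd, (PySem.Int.mod_eq_zero_iff_dvd d 1).mpr (one_dvd d)⟩ hnP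
        · exact h'
      obtain ⟨ha, hb, hc⟩ := ih h1t
      exact ⟨List.mem_cons_of_mem _ ha, hb, hc⟩

theorem pickA_none (d : Int) :
    ∀ (l : List Int), (∀ y ∈ l, ¬ (y ≤ d ∧ PySem.Int.mod d y = 0)) → pickA d l = 1 := by
  intro l
  induction l with
  | nil => intro _; rfl
  | cons h t ih =>
    intro hno
    simp only [pickA]
    rw [if_neg (hno h List.mem_cons_self)]
    exact ih (fun y hy => hno y (List.mem_cons_of_mem _ hy))

theorem desc_of_sorted_set (xs : List Int) :
    (PySem.List.sorted (PySem.Set.ofList xs) (fun x => x) true).Pairwise (fun a b => b < a) := by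
  have hnd : (PySem.List.sorted (PySem.Set.ofList xs) (fun x => x) true).Nodup :=
    (PySem.List.sorted_perm (PySem.Set.ofList xs) (fun x => x) true).symm.nodup
      (PySem.Set.nodup_ofList xs)
  have hge := PySem.List.sorted_pairwise_rev (PySem.Set.ofList xs) (fun x => x)
  exact (hge.and hnd).imp (fun hab => lt_of_le_of_ne hab.1 (Ne.symm hab.2))

-- characterisation of A's result for d ≥ 1: it qualifies and dominates everything that qualifies
theorem A_char (d t : Int) (hd : (1 : Int) ≤ d) :
    Qual d (max 1 (min d t)) (choose_m_py d t) ∧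
      ∀ x, Qual d (max 1 (min d t)) x → x ≤ choose_m_py d t := by
  set desired := max 1 (min d t) with hdes
  have hdes1 : (1 : Int) ≤ desired := le_max_left _ _
  have hdesd : desired ≤ d := by
    rcases le_or_gt (min d t) 1 with h | h
    · omega
    · have : min d t ≤ d := min_le_left _ _
      omega
  have hmin : min desired d = desired := min_eq_left hdesd
  have hcast : ((desired.toNat : Nat) : Int) = desired := Int.toNat_of_nonneg (by omega)
  set cs0 := PySem.List.sorted (PySem.Set.ofList [desired, 64, 32, 16, 8, 4, 2, 1]) (fun x => x) true with hcs0
  set cs1 := chooseLoopA d desired.toNat cs0 with hcs1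
  set l := PySem.List.sorted (PySem.Set.ofList cs1) (fun x => x) true with hl
  have hA : choose_m_py d t = pickA d l := by
    simp only [choose_m_py, hl, hcs1, hcs0, ← hdes, hmin]
  rw [hA]
  have hmeml : ∀ x, x ∈ l ↔ x ∈ cs1 := by
    intro x
    rw [hl, PySem.List.mem_sorted, PySem.Set.mem_ofList]
  have hmem0 : ∀ x, x ∈ cs0 ↔ x ∈ [desired, 64, 32, 16, 8, 4, 2, 1] := by
    intro x
    rw [hcs0, PySem.List.mem_sorted, PySem.Set.mem_ofList]
  have hdesc : l.Pairwise (fun a b => b < a) := desc_of_sorted_set cs1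
  have h1l : (1 : Int) ∈ l := by
    rw [hmeml, hcs1]
    exact loopA_mono d 1 _ _ ((hmem0 1).mpr (by simp))
  obtain ⟨hm, hle, hdvd⟩ := pickA_mem d hd l h1l
  constructor
  · -- Qual of the result
    refine ⟨?_, hdvd, ?_⟩
    · rcases loopA_mem d _ _ _ ((hmeml _).mp hm) with hin0 | hdiv
      · have := (hmem0 _).mp hin0; simp at this; omega
      · exact hdiv.1
    · rcases loopA_mem d _ _ _ ((hmeml _).mp hm) with hin0 | hdiv
      · have := (hmem0 _).mp hin0
        simp at this
        rcases this with h | h | h | h | h | h | h | h <;> omega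
      · left; rw [← hcast]; exact hdiv.2.1
  · -- upper bound
    intro x ⟨hx1, hxdvd, hxtag⟩
    have hub : ∀ y ∈ l, (y ≤ d ∧ PySem.Int.mod d y = 0) → y ≤ pickA d l :=
      pickA_ub d l hdesc
    rcases hxtag with hxd | hpow
    · -- x ≤ desired : use the cover lemma
      obtain ⟨y, hy, hxy, hydvd, hy1, _⟩ :=
        loopA_cover d desired.toNat cs0 x hx1 (by rw [hcast]; exact hxd) hxdvd
      have hyd : y ≤ d := Int.le_of_dvd (by omega) hydvd
      have := hub y ((hmeml y).mpr (hcs1 ▸ hy))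
        ⟨hyd, (PySem.Int.mod_eq_zero_iff_dvd d y).mpr hydvd⟩
      omega
    · -- x is one of the fixed powers: it sits in cs0 ⊆ cs1 ⊆ l
      have hx0 : x ∈ cs0 := (hmem0 x).mpr (by rcases hpow with h|h|h|h|h|h <;> simp [h])
      have hxl : x ∈ l := (hmeml x).mpr (hcs1 ▸ loopA_mono d x _ _ hx0)
      have hxd : x ≤ d := Int.le_of_dvd (by omega) hxdvd
      have := hub x hxl ⟨hxd, (PySem.Int.mod_eq_zero_iff_dvd d x).mpr hxdvd⟩
      omega

-- ---- B-side lemmas ----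

theorem cofactor_facts (d x : Int) (hd : (1 : Int) ≤ d) (hx : (1 : Int) ≤ x) (hdvd : x ∣ d) :
    (1 : Int) ≤ d / x ∧ (d / x) ∣ d ∧ d / (d / x) = x ∧ x * (d / x) = d := by
  have hxd : x ≤ d := Int.le_of_dvd (by omega) hdvd
  have hmul : x * (d / x) = d := Int.mul_ediv_cancel' hdvd
  have h1 : (1 : Int) ≤ d / x := by
    rcases lt_or_ge (d / x) 1 with h | h
    · exfalso; nlinarith
    · exact h
  have hdvd2 : (d / x) ∣ d := ⟨x, by linarith [hmul.symm, mul_comm x (d / x)]⟩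
  have hback : d / (d / x) = x := by
    have : (d / x) * x = d := by rw [mul_comm]; exact hmul
    calc d / (d / x) = ((d / x) * x) / (d / x) := by rw [this]
    _ = x := Int.mul_ediv_cancel_left x (by omega)
  exact ⟨h1, hdvd2, hback, hmul⟩

theorem updB_facts (d desired best x : Int) (hqb : Qual d desired best)
    (hx1 : (1 : Int) ≤ x) (hdvd : x ∣ d) :
    Qual d desired (updB desired best x) ∧ best ≤ updB desired best x ∧
      ((x ≤ desired ∨ x = 64 ∨ x = 32 ∨ x = 16 ∨ x = 8 ∨ x = 4 ∨ x = 2) →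
        x ≤ updB desired best x) := by
  unfold updB
  by_cases htag : x ≤ desired ∨ x = 64 ∨ x = 32 ∨ x = 16 ∨ x = 8 ∨ x = 4 ∨ x = 2
  · rw [if_pos htag]
    by_cases hgt : x > best
    · rw [if_pos hgt]; exact ⟨⟨hx1, hdvd, htag⟩, by omega, fun _ => le_refl x⟩
    · rw [if_neg hgt]; exact ⟨hqb, le_refl _, fun _ => by omega⟩
  · rw [if_neg htag]; exact ⟨hqb, le_refl _, fun h => absurd h htag⟩

theorem loopB_spec (d desired : Int) (hd : (1 : Int) ≤ d) :
    ∀ (i : Nat) (best : Int), 1 ≤ i → Qual d desired best →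
      (∀ x, Qual d desired x → x ≤ best ∨ ((i : Int) ≤ x ∧ (i : Int) ≤ d / x)) →
      Qual d desired (loopB d desired i best) ∧
        ∀ x, Qual d desired x → x ≤ loopB d desired i best := by
  intro i best
  induction i, best using loopB.induct d desired with
  | case1 i best hcond best1 ih =>
    intro hi1 hqb hinv
    rw [loopB, dif_pos hcond]
    have hi0 : (0 : Int) < (i : Int) := by exact_mod_cast hi1
    have hiled : (i : Int) ≤ d := by nlinarith
    have hq1 : Qual d desired best1 ∧ best ≤ best1 ∧
        (PySem.Int.mod d (i : Int) = 0 →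
          (((i : Int) ≤ desired ∨ (i : Int) = 64 ∨ (i : Int) = 32 ∨ (i : Int) = 16 ∨ (i : Int) = 8 ∨ (i : Int) = 4 ∨ (i : Int) = 2) → (i : Int) ≤ best1) ∧
          ((d / (i : Int) ≤ desired ∨ d / (i : Int) = 64 ∨ d / (i : Int) = 32 ∨ d / (i : Int) = 16 ∨ d / (i : Int) = 8 ∨ d / (i : Int) = 4 ∨ d / (i : Int) = 2) → d / (i : Int) ≤ best1)) := by
      by_cases hmod : PySem.Int.mod d (i : Int) = 0
      · have hdvd : (i : Int) ∣ d := (PySem.Int.mod_eq_zero_iff_dvd d _).mp hmod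
        obtain ⟨hc1, hc2, _, _⟩ := cofactor_facts d (i : Int) hd (by exact_mod_cast hi1) hdvd
        have hb1 : best1 = updB desired (updB desired best (i : Int)) (d / (i : Int)) := by
          simp only [best1]
          rw [dif_pos hmod, PySem.Int.floordiv_eq_ediv_of_pos hi0]
        obtain ⟨hqa, hlea, htga⟩ := updB_facts d desired best (i : Int) hqb (by exact_mod_cast hi1) hdvd
        obtain ⟨hqb2, hleb, htgb⟩ := updB_facts d desired (updB desired best (i : Int)) (d / (i : Int)) hqa hc1 hc2
        rw [hb1]
        exact ⟨hqb2, le_trans hlea hleb, fun _ =>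
          ⟨fun ht => le_trans (htga ht) hleb, htgb⟩⟩
      · have hb1 : best1 = best := by simp only [best1]; rw [dif_neg hmod]
        rw [hb1]
        exact ⟨hqb, le_refl _, fun h => absurd h hmod⟩
    obtain ⟨hqb1, hble, hproc⟩ := hq1
    apply ih (by omega) hqb1
    intro x hqx
    rcases hinv x hqx with hxb | ⟨hxi, hxc⟩
    · left; omega
    · obtain ⟨hx1, hxdvd, hxtag⟩ := hqx
      obtain ⟨he1, hcdvd, heback, _⟩ := cofactor_facts d x hd hx1 hxdvd
      have hmodx : PySem.Int.mod d x = 0 := (PySem.Int.mod_eq_zero_iff_dvd d x).mpr hxdvd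
      by_cases hxeq : x = (i : Int)
      · left
        have hmod : PySem.Int.mod d (i : Int) = 0 := hxeq ▸ hmodx
        have := (hproc hmod).1 (hxeq ▸ hxtag)
        omega
      · by_cases hceq : d / x = (i : Int)
        · left
          have hmod : PySem.Int.mod d (i : Int) = 0 := by
            rw [← hceq]; exact (PySem.Int.mod_eq_zero_iff_dvd d _).mpr hcdvd
          have hxdi : x = d / (i : Int) := by rw [← hceq, heback]
          have := (hproc hmod).2 (hxdi ▸ hxtag)
          omega
        · right
          push_cast
          omega
  | case2 i best hcond =>
    intro hi1 hqb hinv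
    rw [loopB, dif_neg hcond]
    refine ⟨hqb, fun x hqx => ?_⟩
    rcases hinv x hqx with h | ⟨hxi, hxc⟩
    · exact h
    · exfalso
      obtain ⟨hx1, hxdvd, _⟩ := hqx
      obtain ⟨he1, _, _, hmul⟩ := cofactor_facts d x hd hx1 hxdvd
      have : (i : Int) * (i : Int) ≤ x * (d / x) := by nlinarith
      nlinarith

theorem B_char (d t : Int) (hd : (1 : Int) ≤ d) :
    Qual d (max 1 (min d t)) (choose_m_py_alt d t) ∧
      ∀ x, Qual d (max 1 (min d t)) x → x ≤ choose_m_py_alt d t := by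
  set desired := max 1 (min d t) with hdes
  have hdes1 : (1 : Int) ≤ desired := le_max_left _ _
  have halt : choose_m_py_alt d t = loopB d desired 1 1 := by
    simp only [choose_m_py_alt, ← hdes, if_neg (by omega : ¬ d ≤ 0)]
  rw [halt]
  apply loopB_spec d desired hd 1 1 (le_refl 1)
  · exact ⟨le_refl 1, one_dvd d, Or.inl hdes1⟩
  · intro x ⟨hx1, hxdvd, _⟩
    right
    obtain ⟨he1, _, _, _⟩ := cofactor_facts d x hd hx1 hxdvd
    push_cast
    omega

-- ===== VERDICT (by name: the statement is the Claim_ definition above) =====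
theorem choose_m_py_spec : Claim_equal_choose_m_py := by
  intro d t _
  unfold Spec_choose_m_py
  rcases le_or_gt d 0 with hd0 | hd1
  · -- d ≤ 0: both sides return 1
    have halt : choose_m_py_alt d t = 1 := by simp [choose_m_py_alt, hd0]
    rw [halt]
    have hmin : (min (max 1 (min d t)) d).toNat = 0 := by
      have : min (max 1 (min d t)) d ≤ d := min_le_right _ _
      omega
    simp only [choose_m_py, hmin]
    apply pickA_none
    intro y hy
    rw [PySem.List.mem_sorted, PySem.Set.mem_ofList] at hy
    rcases loopA_mem d y 0 _ hy with h0 | hdiv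
    · rw [PySem.List.mem_sorted, PySem.Set.mem_ofList] at h0
      simp at h0
      rintro ⟨hyd, _⟩
      rcases h0 with h | h | h | h | h | h | h | h <;> omega
    · rintro ⟨_, _⟩; simp at hdiv; omega
  · -- d ≥ 1: both are the greatest qualifying divisor
    have hd : (1 : Int) ≤ d := hd1
    obtain ⟨hqA, hubA⟩ := A_char d t hd
    obtain ⟨hqB, hubB⟩ := B_char d t hd
    exact le_antisymm (hubB _ hqA) (hubA _ hqB)
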